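-- pv_equiv track=rewrite | github.com/yannickloth/W33-Theory | tools/verify_firewall_filtered_trinification_section_sectors.py | _focus_vertex
-- ===== SOURCE A (Python) =====
-- from typing import Dict, List, Sequence, Tuple
--
-- def _focus_vertex(
--     triads_fw: Sequence[Tuple[int, int, int, int]], rows: set[int]
-- ) -> int | None:
--     """
--     In every closed affine section we observe exactly 4 contained triads, all sharing a unique vertex.
--     Return that vertex id, else None.
--     """
--     contained = [
--         set((i, j, k))
--         for i, j, k, _s in triads_fw
--         if (i in rows and j in rows and k in rows)
--     ]
--     if not contained:
--         return None
--     common = set.intersection(*contained)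
--     if len(common) != 1:
--         return None
--     return int(next(iter(common)))
-- ===== SOURCE B (Python) =====
-- def _focus_vertex(triads_fw, rows):
--     # One pass: collect per-triad deduped vertices of contained triads, count them,
--     # then keep the vertices seen in all n contained triads.
--     verts = []
--     n = 0
--     for i, j, k, _s in triads_fw:
--         if i in rows and j in rows and k in rows:
--             n += 1
--             verts.extend(dict.fromkeys((i, j, k)))
--     if n == 0:
--         return None
--     counts = {}
--     for v in verts:
--         counts[v] = counts.get(v, 0) + 1
--     winners = [v for v, c in counts.items() if c == n]
--     if len(winners) != 1:
--         return None
--     return int(winners[0])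
-- ===== Notes on version B (the rewrite author's own statement) =====
-- stated objective: alternative
-- what changed: Replaces building a list of per-triad sets and folding set.intersection over them by a frequency count: one pass collects the deduped vertices of contained triads, then the vertices whose count equals the number of contained triads are exactly the common ones.
import Mathlib
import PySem

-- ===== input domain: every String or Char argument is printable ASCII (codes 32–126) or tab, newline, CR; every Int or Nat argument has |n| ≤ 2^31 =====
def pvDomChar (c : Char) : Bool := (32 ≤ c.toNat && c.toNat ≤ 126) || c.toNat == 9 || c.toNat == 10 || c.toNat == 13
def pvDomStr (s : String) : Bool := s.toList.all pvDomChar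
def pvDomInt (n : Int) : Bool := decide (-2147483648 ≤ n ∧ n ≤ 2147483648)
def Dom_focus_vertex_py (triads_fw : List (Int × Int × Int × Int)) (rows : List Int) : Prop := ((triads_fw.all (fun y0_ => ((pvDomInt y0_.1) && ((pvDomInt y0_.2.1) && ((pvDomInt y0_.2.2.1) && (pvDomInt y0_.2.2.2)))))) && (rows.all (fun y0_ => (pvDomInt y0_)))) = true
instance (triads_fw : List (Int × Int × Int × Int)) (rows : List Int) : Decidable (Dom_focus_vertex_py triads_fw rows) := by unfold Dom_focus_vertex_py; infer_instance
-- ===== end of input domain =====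

-- B replaces the intersection fold over per-triad sets by a count-then-filter pass
-- (vertices occurring in all contained triads have count = number of contained triads);
-- same cost, different data structure.


-- ===== PORT A =====
def focus_vertex_py (triads_fw : List (Int × Int × Int × Int)) (rows : List Int) : Option Int :=
  -- contained = [set((i,j,k)) for i,j,k,_s in triads_fw if i in rows and j in rows and k in rows]
  let contained : List (PySem.Set Int) :=
    triads_fw.foldl (fun acc t =>
      if t.1 ∈ rows ∧ t.2.1 ∈ rows ∧ t.2.2.1 ∈ rows
      then acc ++ [PySem.Set.ofList [t.1, t.2.1, t.2.2.1]] else acc) []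
  match contained with
  | [] => none                                    -- if not contained: return None
  | s :: rest =>
    let common := rest.foldl PySem.Set.inter s    -- set.intersection(*contained)
    if PySem.Set.len common ≠ 1 then none
    else common[0]?                               -- int(next(iter(common))): the unique element

-- ===== PORT B =====
def focus_vertex_py_alt (triads_fw : List (Int × Int × Int × Int)) (rows : List Int) : Option Int :=
  let st : List Int × Int :=
    triads_fw.foldl (fun (p : List Int × Int) t =>
      if t.1 ∈ rows ∧ t.2.1 ∈ rows ∧ t.2.2.1 ∈ rows
      then (p.1 ++ PySem.List.dedup [t.1, t.2.1, t.2.2.1], p.2 + 1)   -- verts.extend(dict.fromkeys((i,j,k))); n += 1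
      else p) ([], 0)
  if st.2 = 0 then none
  else
    let counts := st.1.foldl (fun d v => d.insert v (d.getD v 0 + 1)) PySem.Dict.empty  -- counts[v] = counts.get(v,0)+1
    let winners := (counts.items.filter (fun kv => kv.2 = st.2)).map (fun kv => kv.1)   -- [v for v,c in counts.items() if c == n]
    if winners.length ≠ 1 then none
    else winners[0]?

-- ===== PRECONDITION & SPEC =====
def Spec_focus_vertex_py (triads_fw : List (Int × Int × Int × Int)) (rows : List Int) (out : Option Int) : Prop := out = focus_vertex_py_alt triads_fw rows
instance (triads_fw : List (Int × Int × Int × Int)) (rows : List Int) (out : Option Int) : Decidable (Spec_focus_vertex_py triads_fw rows out) := by unfold Spec_focus_vertex_py; infer_instance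

-- ===== CLAIM (what is proved, stated in full; the proofs are below) =====
def Claim_equal_focus_vertex_py : Prop := ∀ (triads_fw : List (Int × Int × Int × Int)) (rows : List Int), Dom_focus_vertex_py triads_fw rows → Spec_focus_vertex_py triads_fw rows (focus_vertex_py triads_fw rows)

-- ===== LEMMAS AND PROOFS =====

-- the list of vertex sets of contained triads, shared characterisation of both ports
def pvC (triads_fw : List (Int × Int × Int × Int)) (rows : List Int) : List (PySem.Set Int) :=
  (triads_fw.filter (fun t => decide (t.1 ∈ rows ∧ t.2.1 ∈ rows ∧ t.2.2.1 ∈ rows))).map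
    (fun t => PySem.Set.ofList [t.1, t.2.1, t.2.2.1])

theorem pvC_foldlA (triads_fw : List (Int × Int × Int × Int)) (rows : List Int)
    (acc : List (PySem.Set Int)) :
    triads_fw.foldl (fun acc t =>
      if t.1 ∈ rows ∧ t.2.1 ∈ rows ∧ t.2.2.1 ∈ rows
      then acc ++ [PySem.Set.ofList [t.1, t.2.1, t.2.2.1]] else acc) acc
      = acc ++ pvC triads_fw rows := by
  induction triads_fw generalizing acc with
  | nil => simp [pvC]
  | cons t ts ih =>
    by_cases h : t.1 ∈ rows ∧ t.2.1 ∈ rows ∧ t.2.2.1 ∈ rows <;>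
      simp [pvC, h, ih]

theorem pvC_foldlB (triads_fw : List (Int × Int × Int × Int)) (rows : List Int)
    (acc : List Int) (n : Int) :
    triads_fw.foldl (fun (p : List Int × Int) t =>
      if t.1 ∈ rows ∧ t.2.1 ∈ rows ∧ t.2.2.1 ∈ rows
      then (p.1 ++ PySem.List.dedup [t.1, t.2.1, t.2.2.1], p.2 + 1)
      else p) (acc, n)
      = (acc ++ (pvC triads_fw rows).flatten, n + ((pvC triads_fw rows).length : Int)) := by
  induction triads_fw generalizing acc n with
  | nil => simp [pvC]
  | cons t ts ih =>
    rw [List.foldl_cons]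
    by_cases h : t.1 ∈ rows ∧ t.2.1 ∈ rows ∧ t.2.2.1 ∈ rows <;>
      simp only [h, ih] <;> simp [pvC, h, PySem.List.dedup_eq_ofList]
    omega


theorem mem_foldl_inter (rest : List (PySem.Set Int)) (s : PySem.Set Int) (v : Int) :
    v ∈ rest.foldl PySem.Set.inter s ↔ v ∈ s ∧ ∀ u ∈ rest, v ∈ u := by
  induction rest generalizing s with
  | nil => simp
  | cons u us ih =>
    simp [ih, PySem.Set.mem_inter]
    tauto

theorem nodup_foldl_inter (rest : List (PySem.Set Int)) (s : PySem.Set Int)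
    (hs : s.Nodup) : (rest.foldl PySem.Set.inter s).Nodup := by
  induction rest generalizing s with
  | nil => exact hs
  | cons u us ih => exact ih _ (PySem.Set.nodup_inter s u hs)

theorem count_flatten (C : List (PySem.Set Int)) (hC : ∀ u ∈ C, u.Nodup) (v : Int) :
    (C.flatten.count v : Int) = ((C.countP (fun u => decide (v ∈ u)) : Nat) : Int) := by
  induction C with
  | nil => simp
  | cons u us ih =>
    have hu : u.Nodup := hC u (by simp)
    have ihu := ih (fun w hw => hC w (by simp [hw]))
    by_cases hv : v ∈ u
    · have : u.count v = 1 := List.count_eq_one_of_mem hu hv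
      simp [List.count_append, hv, this]
      push_cast [ihu]
      push_cast at ihu
      omega
    · have : u.count v = 0 := List.count_eq_zero.mpr hv
      simp [List.count_append, hv, this, ihu]

-- main equivalence on the contained list
theorem pv_main (triads_fw : List (Int × Int × Int × Int)) (rows : List Int) :
    focus_vertex_py triads_fw rows = focus_vertex_py_alt triads_fw rows := by
  have hA := pvC_foldlA triads_fw rows []
  have hB := pvC_foldlB triads_fw rows [] 0
  set C := pvC triads_fw rows with hCdef
  have hCnodup : ∀ u ∈ C, u.Nodup := by
    intro u hu
    simp only [hCdef, pvC] at hu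
    obtain ⟨t, -, heq⟩ := List.mem_map.mp hu
    exact heq ▸ PySem.Set.nodup_ofList _
  unfold focus_vertex_py focus_vertex_py_alt
  rw [hA, hB]
  simp only [List.nil_append, Int.zero_add]
  cases hc : C with
  | nil => simp
  | cons s rest =>
    have hlenne : (((s :: rest : List (PySem.Set Int)).length : Nat) : Int) ≠ 0 := by
      exact_mod_cast (by simp : ((s :: rest : List (PySem.Set Int)).length : Nat) ≠ 0)
    -- B side: counts is the counter of the flattened vertex list
    rw [PySem.Dict.foldl_insert_getD_add_one_eq_counter]
    simp only [if_neg hlenne, PySem.Dict.items_counter]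
    set N : Int := (((s :: rest : List (PySem.Set Int)).length : Nat) : Int) with hN
    set verts := (s :: rest : List (PySem.Set Int)).flatten with hverts
    have hcount := count_flatten (s :: rest) (by rw [← hc]; exact hCnodup)
    set common := rest.foldl PySem.Set.inter s with hcommon
    have hcomN : common.Nodup := nodup_foldl_inter rest s (hCnodup s (by rw [hc]; simp))
    set winners := (((PySem.Set.ofList verts).map (fun k => (k, (verts.count k : Int)))).filter
        (fun kv => kv.2 = N)).map (fun kv => kv.1) with hwin
    have hwinners : winners = (PySem.Set.ofList verts).filter (fun v => decide ((verts.count v : Int) = N)) := by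
      rw [hwin, List.filter_map, List.map_map]
      simp [Function.comp_def]
    have hwinNodup : winners.Nodup := by
      rw [hwinners]; exact (PySem.Set.nodup_ofList verts).filter _
    have hmemw : ∀ v, v ∈ winners ↔ v ∈ common := by
      intro v
      rw [hwinners, List.mem_filter, hcommon, mem_foldl_inter]
      constructor
      · rintro ⟨hvv, hcnt⟩
        simp only [decide_eq_true_eq] at hcnt
        rw [hcount v] at hcnt
        have hle : (s :: rest).countP (fun u => decide (v ∈ u)) = (s :: rest).length := by
          rw [hN] at hcnt
          omega
        have hall := (List.countP_eq_length).mp hle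
        constructor
        · simpa using hall s (by simp)
        · intro u hu; simpa using hall u (by simp [hu])
      · rintro ⟨hvs, hall⟩
        have hallc : ∀ u ∈ (s :: rest : List (PySem.Set Int)), v ∈ u := by
          intro u hu; rcases List.mem_cons.mp hu with rfl | hu
          · exact hvs
          · exact hall u hu
        have hle : (s :: rest).countP (fun u => decide (v ∈ u)) = (s :: rest).length :=
          (List.countP_eq_length).mpr (by intro u hu; simpa using hallc u hu)
        refine ⟨?_, ?_⟩
        · rw [PySem.Set.mem_ofList, hverts]
          exact List.mem_flatten.mpr ⟨s, by simp, hvs⟩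
        · simp only [decide_eq_true_eq]
          rw [hcount v, hle, hN]
    have hperm : winners.Perm common :=
      (List.perm_ext_iff_of_nodup hwinNodup hcomN).mpr hmemw
    have hlen : winners.length = common.length := hperm.length_eq
    simp only [PySem.Set.len, hlen]
    by_cases h1 : common.length = 1
    · simp only [h1, ne_eq, not_true_eq_false, if_false]
      obtain ⟨cv, hcv⟩ := List.length_eq_one_iff.mp h1
      obtain ⟨wv, hwv⟩ := List.length_eq_one_iff.mp (hlen.trans h1)
      have : wv = cv := by
        have := (hmemw wv).mp (by simp [hwv])
        simpa [hcv] using this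
      simp [hcv, hwv, this]
    · simp [h1]

-- ===== VERDICT (by name: the statement is the Claim_ definition above) =====
theorem focus_vertex_py_spec : Claim_equal_focus_vertex_py := by
  intro triads_fw rows _
  exact pv_main triads_fw rows
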